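-- pv_equiv track=rewrite | github.com/Monikasumathi/kyc-in-60s | backend/app/services/risk_engine.py | _is_suspicious_pattern
-- ===== SOURCE A (Python) =====
-- def _is_suspicious_pattern(id_number: str) -> bool:
--     """Detect suspicious patterns in ID number"""
--     # All same digit
--     if len(set(id_number.replace('-', '').replace(' ', ''))) == 1:
--         return True
--
--     # Sequential numbers
--     digits = ''.join(c for c in id_number if c.isdigit())
--     if len(digits) >= 5:
--         for i in range(len(digits) - 4):
--             if digits[i:i+5] in '0123456789' or digits[i:i+5] in '9876543210':
--                 return True
--
--     return False
-- ===== SOURCE B (Python) =====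
-- def _is_suspicious_pattern(id_number: str) -> bool:
--     if len(set(id_number.replace('-', '').replace(' ', ''))) == 1:
--         return True
--
--     # One linear pass over the digits with ascending/descending run counters
--     digits = [c for c in id_number if c.isdigit()]
--     asc = desc = 0
--     prev = None
--     for ch in digits:
--         d = ord(ch)
--         asc = asc + 1 if prev is not None and d == prev + 1 else 1
--         desc = desc + 1 if prev is not None and prev == d + 1 else 1
--         if asc >= 5 or desc >= 5:
--             return True
--         prev = d
--     return False
-- ===== Notes on version B (the rewrite author's own statement) =====
-- stated objective: alternative
-- what changed: The sequential check's repeated 5-character window/substring scan ('digits[i:i+5] in ...' for every i) is replaced by a single linear pass over the digits maintaining ascending and descending run-length counters that fire at 5.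
import Mathlib
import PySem

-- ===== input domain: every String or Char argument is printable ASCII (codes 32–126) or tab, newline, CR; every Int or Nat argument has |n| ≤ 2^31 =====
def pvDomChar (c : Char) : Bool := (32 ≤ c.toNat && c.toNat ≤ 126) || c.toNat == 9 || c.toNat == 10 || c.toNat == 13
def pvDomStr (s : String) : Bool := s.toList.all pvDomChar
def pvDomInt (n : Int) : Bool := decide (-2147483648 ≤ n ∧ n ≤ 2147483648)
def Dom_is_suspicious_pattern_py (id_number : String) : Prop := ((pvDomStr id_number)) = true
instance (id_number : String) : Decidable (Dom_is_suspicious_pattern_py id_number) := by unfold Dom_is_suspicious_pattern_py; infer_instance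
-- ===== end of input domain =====

-- B replaces A's repeated 5-character window/substring scan over the digit string with a single
-- linear pass keeping ascending/descending run counters (objective: alternative single-pass formulation).

-- ===== PORT A =====
def is_suspicious_pattern_py (id_number : String) : Bool :=
  -- if len(set(id_number.replace('-','').replace(' ',''))) == 1: return True
  if PySem.Set.len (PySem.Set.ofList
      (PySem.Str.replace (PySem.Str.replace id_number "-" "") " " "").toList) == 1 then
    true
  else
    -- digits = ''.join(c for c in id_number if c.isdigit())
    let digits := id_number.toList.filter (fun c => PySem.Chars.isdigit c)
    -- if len(digits) >= 5: for i in range(len(digits)-4): early-return True on a match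
    if 5 ≤ digits.length then
      (PySem.List.pyRange 0 ((digits.length : Int) - 4) 1).any (fun i =>
        PySem.Chars.isIn (PySem.List.slice digits (some i) (some (i + 5))) "0123456789".toList ||
        PySem.Chars.isIn (PySem.List.slice digits (some i) (some (i + 5))) "9876543210".toList)
    else false

-- ===== PORT B =====
-- for ch in digits: update run counters (prev is None on the first digit), early-return on 5
def pvRunLoop : List Char → Option Nat → Nat → Nat → Bool
  | [], _, _, _ => false
  | c :: rest, prev, asc, desc =>
    let d := c.toNat
    let asc' := match prev with | some p => if d = p + 1 then asc + 1 else 1 | none => 1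
    let desc' := match prev with | some p => if p = d + 1 then desc + 1 else 1 | none => 1
    if 5 ≤ asc' ∨ 5 ≤ desc' then true else pvRunLoop rest (some d) asc' desc'

def is_suspicious_pattern_py_alt (id_number : String) : Bool :=
  if PySem.Set.len (PySem.Set.ofList
      (PySem.Str.replace (PySem.Str.replace id_number "-" "") " " "").toList) == 1 then
    true
  else
    pvRunLoop (id_number.toList.filter (fun c => PySem.Chars.isdigit c)) none 0 0

-- ===== PRECONDITION & SPEC =====
def Spec_is_suspicious_pattern_py (id_number : String) (out : Bool) : Prop := out = is_suspicious_pattern_py_alt id_number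
instance (id_number : String) (out : Bool) : Decidable (Spec_is_suspicious_pattern_py id_number out) := by unfold Spec_is_suspicious_pattern_py; infer_instance

-- ===== CLAIM (what is proved, stated in full; the proofs are below) =====
def Claim_equal_is_suspicious_pattern_py : Prop := ∀ (id_number : String), Dom_is_suspicious_pattern_py id_number → Spec_is_suspicious_pattern_py id_number (is_suspicious_pattern_py id_number)

-- ===== LEMMAS AND PROOFS =====

-- proof-side vocabulary: "rest starts with k consecutive ascending (descending) codes after p"
def contAsc : Nat → Nat → List Char → Bool
  | _, 0, _ => true
  | _, _+1, [] => false
  | p, k+1, c :: rest => (c.toNat == p + 1) && contAsc c.toNat k rest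

def contDesc : Nat → Nat → List Char → Bool
  | _, 0, _ => true
  | _, _+1, [] => false
  | p, k+1, c :: rest => (p == c.toNat + 1) && contDesc c.toNat k rest

-- "some 5-window of l is a consecutive ascending or descending run"
def winScan : List Char → Bool
  | [] => false
  | c :: rest => contAsc c.toNat 4 rest || contDesc c.toNat 4 rest || winScan rest

def ascL : List Char := ['0','1','2','3','4','5','6','7','8','9']

lemma char_toNat_inj {a b : Char} (h : a.toNat = b.toNat) : a = b := by
  apply Char.ext; exact UInt32.toNat_inj.mp h

lemma digit_bounds {a : Char} (h : PySem.Chars.isdigit a = true) : 48 ≤ a.toNat ∧ a.toNat ≤ 57 := by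
  simp [PySem.Chars.isdigit, Char.le_def, UInt32.le_iff_toNat_le] at h
  exact h

lemma digit_cases {a : Char} (h : PySem.Chars.isdigit a = true) :
    a = '0' ∨ a = '1' ∨ a = '2' ∨ a = '3' ∨ a = '4' ∨ a = '5' ∨ a = '6' ∨ a = '7' ∨ a = '8' ∨ a = '9' := by
  obtain ⟨h1, h2⟩ := digit_bounds h
  set n := a.toNat with hn
  interval_cases n
  · exact Or.inl (char_toNat_inj hn.symm)
  · exact Or.inr (Or.inl (char_toNat_inj hn.symm))
  · exact Or.inr (Or.inr (Or.inl (char_toNat_inj hn.symm)))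
  · exact Or.inr (Or.inr (Or.inr (Or.inl (char_toNat_inj hn.symm))))
  · exact Or.inr (Or.inr (Or.inr (Or.inr (Or.inl (char_toNat_inj hn.symm)))))
  · exact Or.inr (Or.inr (Or.inr (Or.inr (Or.inr (Or.inl (char_toNat_inj hn.symm))))))
  · exact Or.inr (Or.inr (Or.inr (Or.inr (Or.inr (Or.inr (Or.inl (char_toNat_inj hn.symm)))))))
  · exact Or.inr (Or.inr (Or.inr (Or.inr (Or.inr (Or.inr (Or.inr (Or.inl (char_toNat_inj hn.symm))))))))
  · exact Or.inr (Or.inr (Or.inr (Or.inr (Or.inr (Or.inr (Or.inr (Or.inr (Or.inl (char_toNat_inj hn.symm)))))))))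
  · exact Or.inr (Or.inr (Or.inr (Or.inr (Or.inr (Or.inr (Or.inr (Or.inr (Or.inr (char_toNat_inj hn.symm)))))))))


lemma asc_window {a b c d e : Char} (ha : PySem.Chars.isdigit a = true)
    (he : PySem.Chars.isdigit e = true) :
    PySem.Chars.isIn [a,b,c,d,e] ascL =
      ((b.toNat == a.toNat + 1) && (c.toNat == b.toNat + 1) && (d.toNat == c.toNat + 1) && (e.toNat == d.toNat + 1)) := by
  rw [Bool.eq_iff_iff, PySem.Chars.isIn_iff_infix]
  simp only [Bool.and_eq_true, beq_iff_eq]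
  constructor
  · intro h
    simp [ascL, List.infix_cons_iff, List.cons_prefix_cons] at h
    rcases h with ⟨rfl,rfl,rfl,rfl,rfl⟩|⟨rfl,rfl,rfl,rfl,rfl⟩|⟨rfl,rfl,rfl,rfl,rfl⟩|⟨rfl,rfl,rfl,rfl,rfl⟩|⟨rfl,rfl,rfl,rfl,rfl⟩|⟨rfl,rfl,rfl,rfl,rfl⟩ <;> decide
  · rintro ⟨⟨⟨hb, hc⟩, hd⟩, heq⟩
    obtain ⟨he1, he2⟩ := digit_bounds he
    rcases digit_cases ha with rfl|rfl|rfl|rfl|rfl|rfl|rfl|rfl|rfl|rfl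
    · obtain rfl : b = '1' := char_toNat_inj (by rw [hb]; decide)
      obtain rfl : c = '2' := char_toNat_inj (by rw [hc]; decide)
      obtain rfl : d = '3' := char_toNat_inj (by rw [hd]; decide)
      obtain rfl : e = '4' := char_toNat_inj (by rw [heq]; decide)
      decide
    · obtain rfl : b = '2' := char_toNat_inj (by rw [hb]; decide)
      obtain rfl : c = '3' := char_toNat_inj (by rw [hc]; decide)
      obtain rfl : d = '4' := char_toNat_inj (by rw [hd]; decide)
      obtain rfl : e = '5' := char_toNat_inj (by rw [heq]; decide)
      decide
    · obtain rfl : b = '3' := char_toNat_inj (by rw [hb]; decide)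
      obtain rfl : c = '4' := char_toNat_inj (by rw [hc]; decide)
      obtain rfl : d = '5' := char_toNat_inj (by rw [hd]; decide)
      obtain rfl : e = '6' := char_toNat_inj (by rw [heq]; decide)
      decide
    · obtain rfl : b = '4' := char_toNat_inj (by rw [hb]; decide)
      obtain rfl : c = '5' := char_toNat_inj (by rw [hc]; decide)
      obtain rfl : d = '6' := char_toNat_inj (by rw [hd]; decide)
      obtain rfl : e = '7' := char_toNat_inj (by rw [heq]; decide)
      decide
    · obtain rfl : b = '5' := char_toNat_inj (by rw [hb]; decide)
      obtain rfl : c = '6' := char_toNat_inj (by rw [hc]; decide)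
      obtain rfl : d = '7' := char_toNat_inj (by rw [hd]; decide)
      obtain rfl : e = '8' := char_toNat_inj (by rw [heq]; decide)
      decide
    · obtain rfl : b = '6' := char_toNat_inj (by rw [hb]; decide)
      obtain rfl : c = '7' := char_toNat_inj (by rw [hc]; decide)
      obtain rfl : d = '8' := char_toNat_inj (by rw [hd]; decide)
      obtain rfl : e = '9' := char_toNat_inj (by rw [heq]; decide)
      decide
    · exfalso
      have hA : ('6':Char).toNat = 54 := by decide
      omega
    · exfalso
      have hA : ('7':Char).toNat = 55 := by decide
      omega
    · exfalso
      have hA : ('8':Char).toNat = 56 := by decide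
      omega
    · exfalso
      have hA : ('9':Char).toNat = 57 := by decide
      omega

lemma desc_of_asc (sub : List Char) :
    PySem.Chars.isIn sub "9876543210".toList = PySem.Chars.isIn sub.reverse ascL := by
  rw [Bool.eq_iff_iff, PySem.Chars.isIn_iff_infix, PySem.Chars.isIn_iff_infix]
  have h : ("9876543210".toList).reverse = ascL := by decide
  rw [← h]
  exact List.reverse_infix.symm

lemma contAsc_mono {k j : Nat} {p : Nat} {rest : List Char} (hjk : j ≤ k)
    (h : contAsc p k rest = true) : contAsc p j rest = true := by
  induction k generalizing j p rest with
  | zero => interval_cases j; exact h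
  | succ k ih =>
    cases j with
    | zero => simp [contAsc]
    | succ j =>
      cases rest with
      | nil => simp [contAsc] at h
      | cons c rest =>
        simp only [contAsc, Bool.and_eq_true] at h ⊢
        exact ⟨h.1, ih (by omega) h.2⟩

lemma contDesc_mono {k j : Nat} {p : Nat} {rest : List Char} (hjk : j ≤ k)
    (h : contDesc p k rest = true) : contDesc p j rest = true := by
  induction k generalizing j p rest with
  | zero => interval_cases j; exact h
  | succ k ih =>
    cases j with
    | zero => simp [contDesc]
    | succ j =>
      cases rest with
      | nil => simp [contDesc] at h
      | cons c rest =>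
        simp only [contDesc, Bool.and_eq_true] at h ⊢
        exact ⟨h.1, ih (by omega) h.2⟩

lemma contAsc_short {k : Nat} {p : Nat} {rest : List Char} (h : rest.length < k) :
    contAsc p k rest = false := by
  induction rest generalizing p k with
  | nil => cases k with | zero => omega | succ k => simp [contAsc]
  | cons c rest ih =>
    cases k with
    | zero => omega
    | succ k => simp only [contAsc, Bool.and_eq_false_iff]; right; exact ih (by simpa using h)

lemma contDesc_short {k : Nat} {p : Nat} {rest : List Char} (h : rest.length < k) :
    contDesc p k rest = false := by
  induction rest generalizing p k with
  | nil => cases k with | zero => omega | succ k => simp [contDesc]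
  | cons c rest ih =>
    cases k with
    | zero => omega
    | succ k => simp only [contDesc, Bool.and_eq_false_iff]; right; exact ih (by simpa using h)

lemma winScan_short {l : List Char} (h : l.length < 5) : winScan l = false := by
  induction l with
  | nil => rfl
  | cons c rest ih =>
    simp only [winScan, Bool.or_eq_false_iff]
    refine ⟨⟨contAsc_short (by simp at h ⊢; omega), contDesc_short (by simp at h ⊢; omega)⟩,
      ih (by simp at h ⊢; omega)⟩

lemma pvRunLoop_cons (c : Char) (rest : List Char) (p a d : Nat) :
    pvRunLoop (c :: rest) (some p) a d =
      if 5 ≤ (if c.toNat = p + 1 then a + 1 else 1) ∨ 5 ≤ (if p = c.toNat + 1 then d + 1 else 1)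
      then true
      else pvRunLoop rest (some c.toNat) (if c.toNat = p + 1 then a + 1 else 1)
        (if p = c.toNat + 1 then d + 1 else 1) := rfl

-- the run-counter loop detects exactly the windows: spill-over runs from the state, or windows inside rest
lemma pvRunLoop_spec (rest : List Char) :
    ∀ p a d, 1 ≤ a → a ≤ 4 → 1 ≤ d → d ≤ 4 →
    pvRunLoop rest (some p) a d =
      (contAsc p (5 - a) rest || contDesc p (5 - d) rest || winScan rest) := by
  induction rest with
  | nil =>
    intro p a d ha1 ha2 hd1 hd2
    rw [show (5:Nat) - a = (4 - a) + 1 from by omega, show (5:Nat) - d = (4 - d) + 1 from by omega]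
    simp [pvRunLoop, contAsc, contDesc, winScan]
  | cons c rest ih =>
    intro p a d ha1 ha2 hd1 hd2
    have h5a : 5 - a = 4 - a + 1 := by omega
    have h5d : 5 - d = 4 - d + 1 := by omega
    by_cases h1 : c.toNat = p + 1
    · have h2 : ¬ p = c.toNat + 1 := by omega
      have hA1 : (c.toNat == p + 1) = true := by simp [h1]
      have hD0 : (p == c.toNat + 1) = false := by simp [h2]
      by_cases hA : a = 4
      · subst hA
        rw [pvRunLoop_cons, if_pos h1, if_neg h2, if_pos (Or.inl (by omega))]
        rw [show (5:Nat) - 4 = 1 from rfl]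
        simp [contAsc, hA1]
      · have hfire : ¬ (5 ≤ a + 1 ∨ 5 ≤ 1) := by omega
        rw [pvRunLoop_cons, if_pos h1, if_neg h2, if_neg hfire,
          ih c.toNat (a + 1) 1 (by omega) (by omega) (by omega) (by omega),
          show (5:Nat) - (a + 1) = 4 - a from by omega, show (5:Nat) - 1 = 4 from rfl,
          h5a, h5d]
        simp only [contAsc, contDesc, winScan, hA1, hD0, Bool.true_and, Bool.false_and]
        cases hx : contAsc c.toNat (4 - a) rest
        · have hA4 : contAsc c.toNat 4 rest = false := by
            cases hy : contAsc c.toNat 4 rest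
            · rfl
            · exact absurd (contAsc_mono (j := 4 - a) (by omega) hy) (by simp [hx])
          rw [hA4]; simp
        · simp
    · by_cases h2 : p = c.toNat + 1
      · have hA0 : (c.toNat == p + 1) = false := by simp [h1]
        have hD1 : (p == c.toNat + 1) = true := by simp [h2]
        by_cases hD : d = 4
        · subst hD
          rw [pvRunLoop_cons, if_neg h1, if_pos h2, if_pos (Or.inr (by omega))]
          rw [show (5:Nat) - 4 = 1 from rfl]
          simp [contDesc, hD1]
        · have hfire : ¬ ((5:Nat) ≤ 1 ∨ 5 ≤ d + 1) := by omega
          rw [pvRunLoop_cons, if_neg h1, if_pos h2, if_neg hfire,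
            ih c.toNat 1 (d + 1) (by omega) (by omega) (by omega) (by omega),
            show (5:Nat) - (d + 1) = 4 - d from by omega, show (5:Nat) - 1 = 4 from rfl,
            h5a, h5d]
          simp only [contAsc, contDesc, winScan, hA0, hD1, Bool.true_and, Bool.false_and,
            Bool.false_or]
          cases hx : contDesc c.toNat (4 - d) rest
          · have hD4 : contDesc c.toNat 4 rest = false := by
              cases hy : contDesc c.toNat 4 rest
              · rfl
              · exact absurd (contDesc_mono (j := 4 - d) (by omega) hy) (by simp [hx])
            rw [hD4]
            cases contAsc c.toNat 4 rest <;> cases winScan rest <;> simp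
          · cases contAsc c.toNat 4 rest <;> cases winScan rest <;> simp
      · have hA0 : (c.toNat == p + 1) = false := by simp [h1]
        have hD0 : (p == c.toNat + 1) = false := by simp [h2]
        have hfire : ¬ ((5:Nat) ≤ 1 ∨ (5:Nat) ≤ 1) := by omega
        rw [pvRunLoop_cons, if_neg h1, if_neg h2, if_neg hfire,
          ih c.toNat 1 1 (by omega) (by omega) (by omega) (by omega),
          show (5:Nat) - 1 = 4 from rfl, h5a, h5d]
        simp only [contAsc, contDesc, winScan, hA0, hD0, Bool.false_and, Bool.false_or]

lemma pvRunLoop_eq_winScan (l : List Char) : pvRunLoop l none 0 0 = winScan l := by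
  cases l with
  | nil => rfl
  | cons c rest =>
    have lhs : pvRunLoop (c :: rest) none 0 0 = pvRunLoop rest (some c.toNat) 1 1 := by
      simp [pvRunLoop]
    rw [lhs, pvRunLoop_spec rest c.toNat 1 1 (by omega) (by omega) (by omega) (by omega)]
    simp [winScan]

lemma contAsc4 (p : Nat) (b1 b2 b3 b4 : Char) (rest : List Char) :
    contAsc p 4 (b1 :: b2 :: b3 :: b4 :: rest) =
      ((b1.toNat == p + 1) && (b2.toNat == b1.toNat + 1) && (b3.toNat == b2.toNat + 1) &&
        (b4.toNat == b3.toNat + 1)) := by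
  simp only [contAsc, Bool.and_true]
  rw [Bool.eq_iff_iff]
  simp only [Bool.and_eq_true]
  tauto

lemma contDesc4 (p : Nat) (b1 b2 b3 b4 : Char) (rest : List Char) :
    contDesc p 4 (b1 :: b2 :: b3 :: b4 :: rest) =
      ((p == b1.toNat + 1) && (b1.toNat == b2.toNat + 1) && (b2.toNat == b3.toNat + 1) &&
        (b3.toNat == b4.toNat + 1)) := by
  simp only [contDesc, Bool.and_true]
  rw [Bool.eq_iff_iff]
  simp only [Bool.and_eq_true]
  tauto

-- A's range loop over 5-windows equals winScan, for a list of digit characters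
lemma rangeAny_eq_winScan (l : List Char) (hd : ∀ c ∈ l, PySem.Chars.isdigit c = true) :
    (List.range (l.length - 4)).any (fun k =>
      PySem.Chars.isIn ((l.drop k).take 5) "0123456789".toList ||
      PySem.Chars.isIn ((l.drop k).take 5) "9876543210".toList) = winScan l := by
  induction l with
  | nil => rfl
  | cons c rest ih =>
    by_cases h4 : 4 ≤ rest.length
    · have hlen : (c :: rest).length - 4 = (rest.length - 4) + 1 := by simp; omega
      rw [hlen, List.range_succ_eq_map]
      simp only [List.any_cons, List.any_map, Function.comp_def, List.drop_succ_cons,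
        List.drop_zero]
      rw [ih (fun x hx => hd x (List.mem_cons_of_mem _ hx))]
      obtain ⟨b1, rest1, rfl⟩ : ∃ b1 rest1, rest = b1 :: rest1 := by
        cases rest with | nil => simp at h4 | cons x xs => exact ⟨x, xs, rfl⟩
      obtain ⟨b2, rest2, rfl⟩ : ∃ b2 rest2, rest1 = b2 :: rest2 := by
        cases rest1 with | nil => simp at h4 | cons x xs => exact ⟨x, xs, rfl⟩
      obtain ⟨b3, rest3, rfl⟩ : ∃ b3 rest3, rest2 = b3 :: rest3 := by
        cases rest2 with | nil => simp at h4 | cons x xs => exact ⟨x, xs, rfl⟩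
      obtain ⟨b4, rest4, rfl⟩ : ∃ b4 rest4, rest3 = b4 :: rest4 := by
        cases rest3 with | nil => simp at h4 | cons x xs => exact ⟨x, xs, rfl⟩
      rw [show (c :: b1 :: b2 :: b3 :: b4 :: rest4).take 5 = [c, b1, b2, b3, b4] from rfl]
      have hc : PySem.Chars.isdigit c = true := hd c (List.mem_cons_self ..)
      have hb4 : PySem.Chars.isdigit b4 = true := hd b4 (by simp)
      rw [desc_of_asc, show ([c, b1, b2, b3, b4].reverse) = [b4, b3, b2, b1, c] from rfl,
        show "0123456789".toList = ascL from by decide,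
        asc_window hc hb4, asc_window hb4 hc,
        show winScan (c :: b1 :: b2 :: b3 :: b4 :: rest4) =
          (contAsc c.toNat 4 (b1 :: b2 :: b3 :: b4 :: rest4) ||
            contDesc c.toNat 4 (b1 :: b2 :: b3 :: b4 :: rest4) ||
            winScan (b1 :: b2 :: b3 :: b4 :: rest4)) from rfl,
        contAsc4, contDesc4]
      cases hW : winScan (b1 :: b2 :: b3 :: b4 :: rest4)
      · simp only [Bool.or_false]
        rw [Bool.eq_iff_iff]
        simp only [Bool.or_eq_true, Bool.and_eq_true, beq_iff_eq]
        omega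
      · simp
    · have hlen : (c :: rest).length - 4 = 0 := by simp; omega
      rw [hlen]
      simp only [List.range_zero, List.any_nil]
      exact (winScan_short (by simp; omega)).symm

-- converting A's pyRange/slice loop to a List.range/drop/take loop
lemma pyAny_eq_rangeAny (l : List Char) :
    (PySem.List.pyRange 0 ((l.length : Int) - 4) 1).any (fun i =>
      PySem.Chars.isIn (PySem.List.slice l (some i) (some (i + 5))) "0123456789".toList ||
      PySem.Chars.isIn (PySem.List.slice l (some i) (some (i + 5))) "9876543210".toList) =
    (List.range (l.length - 4)).any (fun k =>
      PySem.Chars.isIn ((l.drop k).take 5) "0123456789".toList ||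
      PySem.Chars.isIn ((l.drop k).take 5) "9876543210".toList) := by
  rw [PySem.List.pyRange_one, List.any_map]
  rw [show (((l.length : Int) - 4) - 0).toNat = l.length - 4 from by omega]
  have hs : ∀ k : Nat,
      PySem.List.slice l (some ((0 : Int) + (k : Int))) (some ((0 : Int) + (k : Int) + 5)) =
        (l.drop k).take 5 := by
    intro k
    rw [PySem.List.slice_toNat (ha := by omega) (hb := by omega)]
    norm_num
    omega
  simp only [Function.comp_def, hs]

-- ===== VERDICT (by name: the statement is the Claim_ definition above) =====
theorem is_suspicious_pattern_py_spec : Claim_equal_is_suspicious_pattern_py := by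
  intro s _
  unfold Spec_is_suspicious_pattern_py is_suspicious_pattern_py is_suspicious_pattern_py_alt
  cases h : (PySem.Set.len (PySem.Set.ofList
      (PySem.Str.replace (PySem.Str.replace s "-" "") " " "").toList) == 1)
  · simp only [Bool.false_eq_true, if_false]
    have hdig : ∀ c ∈ s.toList.filter (fun c => PySem.Chars.isdigit c),
        PySem.Chars.isdigit c = true := fun c hc => (List.mem_filter.mp hc).2
    rw [pvRunLoop_eq_winScan, ← rangeAny_eq_winScan _ hdig]
    by_cases hlen : 5 ≤ (s.toList.filter (fun c => PySem.Chars.isdigit c)).length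
    · rw [if_pos hlen, pyAny_eq_rangeAny]
    · rw [if_neg hlen, show (s.toList.filter (fun c => PySem.Chars.isdigit c)).length - 4 = 0
        from by omega]
      simp
  · simp only [if_true]
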